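-- pv_equiv track=rewrite | github.com/poldrack/academicdb | academic/management/commands/enrich_scopus_authors.py | match_lastname_and_initial
-- ===== SOURCE A (Python) =====
-- def match_lastname_and_initial(pub_name, scopus_author):
--     """Match based on last name and first initial"""
--     surname = scopus_author.get('surname', '') or ''
--     surname = surname.lower()
--     initials = scopus_author.get('initials', '') or ''
--     initials = initials.lower()
--
--     if not surname:
--         return False
--
--     # Parse publication author name
--     name_parts = pub_name.replace(',', ' ').split()
--
--     if len(name_parts) >= 2:
--         # Check if surname matches any part
--         for i, part in enumerate(name_parts):
--             if part == surname:
--                 # Check if we have matching initials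
--                 other_parts = name_parts[:i] + name_parts[i+1:]
--                 for other in other_parts:
--                     if other and initials and other[0] == initials[0]:
--                         return True
--
--     return False
-- ===== SOURCE B (Python) =====
-- def match_lastname_and_initial(pub_name, scopus_author):
--     """Match based on last name and first initial (index-set formulation)."""
--     surname = (scopus_author.get('surname', '') or '').lower()
--     initials = (scopus_author.get('initials', '') or '').lower()
--     if not surname or not initials:
--         return False
--     parts = pub_name.replace(',', ' ').split()
--     if len(parts) < 2:
--         return False
--     S = [i for i, p in enumerate(parts) if p == surname]
--     I = [i for i, p in enumerate(parts) if p[0] == initials[0]]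
--     return bool(S) and bool(I) and not (len(S) == 1 and S == I)
-- ===== Notes on version B (the rewrite author's own statement) =====
-- stated objective: alternative
-- what changed: Replaces A's nested loop (for each surname-matching part, rescan all other parts for the initial) by two single filtered passes building the index lists S (parts equal to surname) and I (parts whose first char matches the initial) and one distinct-pair check: non-empty S and I that are not the same single index.
import Mathlib
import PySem

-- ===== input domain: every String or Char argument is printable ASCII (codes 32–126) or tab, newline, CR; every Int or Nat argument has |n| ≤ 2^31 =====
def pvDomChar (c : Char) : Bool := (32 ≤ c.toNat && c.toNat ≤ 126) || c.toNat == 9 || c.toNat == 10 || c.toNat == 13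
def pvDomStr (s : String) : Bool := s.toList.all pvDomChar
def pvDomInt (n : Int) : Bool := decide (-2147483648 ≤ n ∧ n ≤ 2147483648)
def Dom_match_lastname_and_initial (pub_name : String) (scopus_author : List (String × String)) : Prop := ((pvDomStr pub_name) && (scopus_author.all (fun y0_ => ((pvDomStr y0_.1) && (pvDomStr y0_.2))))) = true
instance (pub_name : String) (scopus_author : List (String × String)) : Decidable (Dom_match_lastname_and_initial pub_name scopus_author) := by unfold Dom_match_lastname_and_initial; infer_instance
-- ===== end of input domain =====

-- B replaces A's nested loop over author-name parts by two single filtered index passes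
-- (surname indices S, initial indices I) and a distinct-pair check; objective: alternative.

-- ===== PORT A =====
-- inner 'for other in other_parts' loop of A
def pvInnerA (initials : String) : List String → Bool
  | [] => false
  | other :: rest =>
    if other != "" && initials != "" && (PySem.Str.pyGet? other 0 == PySem.Str.pyGet? initials 0) then
      true
    else pvInnerA initials rest

-- outer 'for i, part in enumerate(name_parts)' loop of A
def pvOuterA (surname initials : String) (parts : List String) : List (Int × String) → Bool
  | [] => false
  | (i, part) :: rest =>
    if part == surname then
      if pvInnerA initials (PySem.List.slice parts none (some i) ++ PySem.List.slice parts (some (i + 1)) none) then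
        true
      else pvOuterA surname initials parts rest
    else pvOuterA surname initials parts rest

def match_lastname_and_initial (pub_name : String) (scopus_author : List (String × String)) : Bool :=
  let surname0 := PySem.Dict.getD (PySem.Dict.mk scopus_author) "surname" ""
  let surname0 := if surname0 == "" then "" else surname0   -- `or ''`
  let surname := PySem.Str.lower surname0
  let initials0 := PySem.Dict.getD (PySem.Dict.mk scopus_author) "initials" ""
  let initials0 := if initials0 == "" then "" else initials0  -- `or ''`
  let initials := PySem.Str.lower initials0
  if surname == "" then false
  else
    let name_parts := PySem.Str.split₀ (PySem.Str.replace pub_name "," " ")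
    if name_parts.length ≥ 2 then
      pvOuterA surname initials name_parts (PySem.List.enumerate name_parts 0)
    else false

-- ===== PORT B =====
def match_lastname_and_initial_alt (pub_name : String) (scopus_author : List (String × String)) : Bool :=
  let surname0 := PySem.Dict.getD (PySem.Dict.mk scopus_author) "surname" ""
  let surname0 := if surname0 == "" then "" else surname0   -- `or ''`
  let surname := PySem.Str.lower surname0
  let initials0 := PySem.Dict.getD (PySem.Dict.mk scopus_author) "initials" ""
  let initials0 := if initials0 == "" then "" else initials0  -- `or ''`
  let initials := PySem.Str.lower initials0
  if surname == "" || initials == "" then false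
  else
    let parts := PySem.Str.split₀ (PySem.Str.replace pub_name "," " ")
    if parts.length < 2 then false
    else
      let en := PySem.List.enumerate parts 0
      let S := (en.filter (fun p => p.2 == surname)).map (·.1)
      let I := (en.filter (fun p => PySem.Str.pyGet? p.2 0 == PySem.Str.pyGet? initials 0)).map (·.1)
      !S.isEmpty && !I.isEmpty && !(S.length == 1 && S == I)

-- ===== PRECONDITION & SPEC =====
def Spec_match_lastname_and_initial (pub_name : String) (scopus_author : List (String × String)) (out : Bool) : Prop := out = match_lastname_and_initial_alt pub_name scopus_author
instance (pub_name : String) (scopus_author : List (String × String)) (out : Bool) : Decidable (Spec_match_lastname_and_initial pub_name scopus_author out) := by unfold Spec_match_lastname_and_initial; infer_instance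

-- ===== CLAIM (what is proved, stated in full; the proofs are below) =====
def Claim_equal_match_lastname_and_initial : Prop := ∀ (pub_name : String) (scopus_author : List (String × String)), Dom_match_lastname_and_initial pub_name scopus_author → Spec_match_lastname_and_initial pub_name scopus_author (match_lastname_and_initial pub_name scopus_author)

-- ===== LEMMAS AND PROOFS =====

theorem pvInnerA_iff (t : String) (l : List String) :
    pvInnerA t l = true ↔ ∃ o ∈ l, (o != "" && t != "" && (PySem.Str.pyGet? o 0 == PySem.Str.pyGet? t 0)) = true := by
  induction l with
  | nil => simp [pvInnerA]
  | cons o rest ih =>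
    simp only [pvInnerA]
    split_ifs with h
    · constructor
      · intro _; exact ⟨o, List.mem_cons_self, h⟩
      · intro _; rfl
    · simp only [List.mem_cons]
      constructor
      · intro hr; obtain ⟨o', ho', hc⟩ := ih.mp hr; exact ⟨o', Or.inr ho', hc⟩
      · rintro ⟨o', (rfl | ho'), hc⟩
        · exact absurd hc h
        · exact ih.mpr ⟨o', ho', hc⟩

theorem pvOuterA_iff (s t : String) (parts : List String) (en : List (Int × String)) :
    pvOuterA s t parts en = true ↔
      ∃ p ∈ en, p.2 = s ∧ pvInnerA t (PySem.List.slice parts none (some p.1) ++ PySem.List.slice parts (some (p.1 + 1)) none) = true := by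
  induction en with
  | nil => simp [pvOuterA]
  | cons q rest ih =>
    obtain ⟨i, part⟩ := q
    simp only [pvOuterA]
    split_ifs with h1 h2
    · simp only [beq_iff_eq] at h1
      constructor
      · intro _; exact ⟨(i, part), List.mem_cons_self, h1, h2⟩
      · intro _; rfl
    · simp only [beq_iff_eq] at h1
      rw [ih]
      constructor
      · rintro ⟨p, hp, hc⟩; exact ⟨p, List.mem_cons_of_mem _ hp, hc⟩
      · rintro ⟨p, hp, hs, hc⟩
        rcases List.mem_cons.mp hp with rfl | hp'
        · exact absurd hc h2
        · exact ⟨p, hp', hs, hc⟩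
    · rw [ih]
      constructor
      · rintro ⟨p, hp, hc⟩; exact ⟨p, List.mem_cons_of_mem _ hp, hc⟩
      · rintro ⟨p, hp, hs, hc⟩
        rcases List.mem_cons.mp hp with rfl | hp'
        · exact absurd (beq_iff_eq.mpr hs) h1
        · exact ⟨p, hp', hs, hc⟩

-- membership in parts[:k] ++ parts[k+1:] = existence of an index ≠ k
theorem mem_takeDrop_iff {α : Type} (parts : List α) (k : Nat) (hk : k < parts.length) (o : α) :
    o ∈ parts.take k ++ parts.drop (k + 1) ↔ ∃ j, ∃ hj : j < parts.length, j ≠ k ∧ parts[j] = o := by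
  constructor
  · intro h
    rcases List.mem_append.mp h with h' | h'
    · obtain ⟨j, hj, rfl⟩ := List.mem_iff_getElem.mp h'
      have hjk : j < k := by simp [List.length_take] at hj; omega
      refine ⟨j, by omega, by omega, ?_⟩
      simp [List.getElem_take]
    · obtain ⟨j, hj, rfl⟩ := List.mem_iff_getElem.mp h'
      have hjl : j < parts.length - (k + 1) := by simp [List.length_drop] at hj; omega
      refine ⟨k + 1 + j, by omega, by omega, ?_⟩
      simp [List.getElem_drop]
  · rintro ⟨j, hj, hne, rfl⟩
    rcases Nat.lt_or_ge j k with h' | h'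
    · exact List.mem_append.mpr (Or.inl (List.mem_iff_getElem.mpr ⟨j, by simp; omega, by simp [List.getElem_take]⟩))
    · have hjk : k + 1 ≤ j := by omega
      refine List.mem_append.mpr (Or.inr (List.mem_iff_getElem.mpr ⟨j - (k + 1), by simp; omega, ?_⟩))
      rw [List.getElem_drop]
      congr 1
      omega

-- the distinct-pair check of B, for strictly increasing index lists
theorem pair_check {S I : List Int} (hS : S.Pairwise (· < ·)) (hI : I.Pairwise (· < ·)) :
    (!S.isEmpty && !I.isEmpty && !(S.length == 1 && S == I)) = true ↔
      ∃ i ∈ S, ∃ j ∈ I, i ≠ j := by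
  simp only [Bool.and_eq_true, Bool.not_eq_true', List.isEmpty_eq_false_iff,
    Bool.and_eq_false_iff, beq_eq_false_iff_ne, ne_eq]
  constructor
  · rintro ⟨⟨hSne, hIne⟩, hlast⟩
    obtain ⟨a, S', rfl⟩ := List.exists_cons_of_ne_nil hSne
    obtain ⟨b, I', rfl⟩ := List.exists_cons_of_ne_nil hIne
    by_cases hab : a = b
    · subst hab
      rcases hlast with hlen | hne
      · -- S has length ≠ 1, so S' ≠ []
        have hS' : S' ≠ [] := by intro h; subst h; simp at hlen
        obtain ⟨c, S'', rfl⟩ := List.exists_cons_of_ne_nil hS'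
        have hac : a < c := (List.pairwise_cons.mp hS).1 c List.mem_cons_self
        exact ⟨c, by simp, a, by simp, by omega⟩
      · -- a::S' ≠ a::I' : some tail differs; find a distinct pair
        have hSI : S' ≠ I' := fun h => hne (by rw [h])
        rcases S' with _ | ⟨c, S''⟩
        · rcases I' with _ | ⟨d, I''⟩
          · exact absurd rfl hSI
          · have had : a < d := (List.pairwise_cons.mp hI).1 d List.mem_cons_self
            exact ⟨a, by simp, d, by simp, by omega⟩
        · have hac : a < c := (List.pairwise_cons.mp hS).1 c List.mem_cons_self
          exact ⟨c, by simp, a, by simp, by omega⟩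
    · exact ⟨a, by simp, b, by simp, hab⟩
  · rintro ⟨i, hi, j, hj, hij⟩
    refine ⟨⟨List.ne_nil_of_mem hi, List.ne_nil_of_mem hj⟩, ?_⟩
    by_contra h
    push Not at h
    obtain ⟨hlen, hSI⟩ := h
    obtain ⟨a, S', rfl⟩ := List.exists_cons_of_ne_nil (List.ne_nil_of_mem hi)
    have hS' : S' = [] := by simpa using hlen
    subst hS'
    subst hSI
    simp at hi hj
    omega

-- index lists built by B are strictly increasing
theorem pairwise_filter_map_fst {α : Type} (xs : List α) (q : Int × α → Bool) :
    (((PySem.List.enumerate xs 0).filter q).map (·.1)).Pairwise (· < ·) := by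
  exact List.pairwise_map.mpr (List.Pairwise.filter q (PySem.List.pairwise_lt_enumerate xs 0))

-- membership in B's index lists
theorem mem_idx_iff {α : Type} (xs : List α) (q : Int × α → Bool) (i : Int) :
    i ∈ ((PySem.List.enumerate xs 0).filter q).map (·.1) ↔
      ∃ k : Nat, ∃ hk : k < xs.length, i = (k : Int) ∧ q (i, xs[k]) = true := by
  simp only [List.mem_map, List.mem_filter]
  constructor
  · rintro ⟨p, ⟨hp, hq⟩, rfl⟩
    obtain ⟨k, hk, rfl⟩ := (PySem.List.mem_enumerate_iff xs 0 p).mp hp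
    exact ⟨k, hk, by simp, by simpa using hq⟩
  · rintro ⟨k, hk, rfl, hq⟩
    refine ⟨((k : Int), xs[k]), ⟨(PySem.List.mem_enumerate_iff xs 0 _).mpr ⟨k, hk, by simp⟩, hq⟩, rfl⟩

-- if t ≠ "", the nonemptiness test on o in A's inner condition is implied by the head equality
theorem headEq_forces_nonempty (t o : String) (ht : t ≠ "") :
    (PySem.Str.pyGet? o 0 == PySem.Str.pyGet? t 0) = true → o ≠ "" := by
  intro h rfl
  have ht' : t.toList ≠ [] := by
    intro h'
    exact ht (String.toList_inj.mp (by simp [h']))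
  rcases List.exists_cons_of_ne_nil ht' with ⟨c, cs, hc⟩
  have h0 : PySem.Str.pyGet? t 0 = t.toList[(0:Nat)]? := by
    simpa using PySem.Str.pyGet?_natCast t 0
  have he : PySem.Str.pyGet? "" 0 = ("" : String).toList[(0:Nat)]? := by
    simpa using PySem.Str.pyGet?_natCast "" 0
  rw [beq_iff_eq, he, h0, hc] at h
  simp at h

-- core equivalence on the shared intermediate values
theorem core_equiv (s t : String) (parts : List String) :
    (if s == "" then false
     else if parts.length ≥ 2 then pvOuterA s t parts (PySem.List.enumerate parts 0) else false)
    = (if s == "" || t == "" then false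
       else if parts.length < 2 then false
       else
        let en := PySem.List.enumerate parts 0
        let S := (en.filter (fun p => p.2 == s)).map (·.1)
        let I := (en.filter (fun p => PySem.Str.pyGet? p.2 0 == PySem.Str.pyGet? t 0)).map (·.1)
        !S.isEmpty && !I.isEmpty && !(S.length == 1 && S == I)) := by
  by_cases hs : s = ""
  · simp [hs]
  · rw [if_neg (by simpa using hs)]
    by_cases ht : t = ""
    · -- A's inner loop can never fire with empty initials
      have hinner : ∀ l, pvInnerA t l = false := by
        intro l
        rw [Bool.eq_false_iff]
        intro hc
        obtain ⟨o, _, h⟩ := (pvInnerA_iff t l).mp hc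
        simp [ht] at h
      have houter : ∀ en, pvOuterA s t parts en = false := by
        intro en
        rw [Bool.eq_false_iff]
        intro hc
        obtain ⟨p, _, _, h⟩ := (pvOuterA_iff s t parts en).mp hc
        rw [hinner] at h
        exact Bool.false_ne_true h
      rw [if_pos (show (s == "" || t == "") = true by simp [ht])]
      split_ifs with h2
      · exact houter _
      · rfl
    · rw [if_neg (show ¬((s == "" || t == "") = true) by simp [hs, ht])]
      by_cases hlen : parts.length < 2
      · rw [if_pos hlen, if_neg (by omega)]
      · rw [if_neg hlen, if_pos (by omega)]
        simp only
        rw [Bool.eq_iff_iff, pvOuterA_iff,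
          pair_check (pairwise_filter_map_fst parts _) (pairwise_filter_map_fst parts _)]
        constructor
        · rintro ⟨p, hp, hps, hinner⟩
          obtain ⟨k, hk, rfl⟩ := (PySem.List.mem_enumerate_iff parts 0 p).mp hp
          simp only at hps hinner ⊢
          rw [PySem.List.slice_to parts (by positivity),
              PySem.List.slice_from parts (by positivity)] at hinner
          have h0k : ((0:Int) + (k:Int)).toNat = k := by omega
          rw [h0k] at hinner
          have h1k : ((0:Int) + (k:Int) + 1).toNat = k + 1 := by omega
          rw [h1k] at hinner
          obtain ⟨o, ho, hcond⟩ := (pvInnerA_iff t _).mp hinner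
          obtain ⟨j, hj, hjk, rfl⟩ := (mem_takeDrop_iff parts k hk o).mp ho
          refine ⟨(k:Int), ?_, (j:Int), ?_, by omega⟩
          · exact (mem_idx_iff parts _ _).mpr ⟨k, hk, rfl, by simpa using hps⟩
          · refine (mem_idx_iff parts _ _).mpr ⟨j, hj, rfl, ?_⟩
            simp only [Bool.and_eq_true] at hcond
            exact hcond.2
        · rintro ⟨i, hi, j, hj, hij⟩
          obtain ⟨k, hk, rfl, hqk⟩ := (mem_idx_iff parts _ i).mp hi
          obtain ⟨j', hj', rfl, hqj⟩ := (mem_idx_iff parts _ j).mp hj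
          simp only [beq_iff_eq] at hqk
          refine ⟨((k:Int), parts[k]), (PySem.List.mem_enumerate_iff parts 0 _).mpr ⟨k, hk, by simp⟩, hqk, ?_⟩
          simp only
          rw [PySem.List.slice_to parts (by positivity),
          PySem.List.slice_from parts (by positivity)]
          have h0k : ((k:Int)).toNat = k := by omega
          have h1k : ((k:Int) + 1).toNat = k + 1 := by omega
          rw [h0k, h1k]
          refine (pvInnerA_iff t _).mpr ⟨parts[j'], ?_, ?_⟩
          · exact (mem_takeDrop_iff parts k hk _).mpr ⟨j', hj', by omega, rfl⟩
          · have hne : parts[j'] ≠ "" := headEq_forces_nonempty t parts[j'] ht hqj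
            simp [hne, ht]
            simpa using hqj

-- ===== VERDICT (by name: the statement is the Claim_ definition above) =====
theorem match_lastname_and_initial_spec : Claim_equal_match_lastname_and_initial := by
  intro pub_name scopus_author _
  unfold Spec_match_lastname_and_initial match_lastname_and_initial match_lastname_and_initial_alt
  exact core_equiv _ _ _
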